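-- pv_equiv track=rewrite | github.com/ckdals4600/BaekJoon | 프로그래머스/3/60062. 외벽 점검/외벽 점검.py | solution
-- ===== SOURCE A (Python) =====
-- import itertools
--
-- def solution(n, weak, dist):
--     answer = -1
--
--     def addVisited(start, num, visited):
--         nxt = start
--         loop = 0
--         while len(visited) < len(weak):
--             if nxt >= len(weak):
--                 nxt -= len(weak)
--                 loop += 1
--
--             if weak[nxt] > weak[start] + num - loop * n:
--                 break
--             visited.add(weak[nxt])
--
--             nxt += 1
--         return nxt
--
--
--     for idx in range(len(weak)):
--         for dists in itertools.permutations(dist):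
--             ptr = idx
--             visited = set()
--             min_candidate = 0
--
--             for d in dists:
--                 ptr = addVisited(ptr, d, visited)
--                 min_candidate += 1
--
--                 if min_candidate > answer and answer != -1:
--                     break
--
--                 if len(visited) == len(weak):
--                     answer = min(answer, min_candidate) if answer != -1 else min_candidate
--                     break
--
--
--
--
--     return answer
-- ===== SOURCE B (Python) =====
-- from itertools import permutations
--
--
-- def covers(weak2, i, L, perm):
--     """Number of friends from perm (taken in order) needed to cover the L
--     weak points weak2[i:i+L] starting at weak2[i], or None if perm runs out."""
--     used = 0
--     reach = weak2[i] - 1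
--     for j in range(i, i + L):
--         while weak2[j] > reach:
--             if used == len(perm):
--                 return None
--             reach = weak2[j] + perm[used]
--             used += 1
--     return used
--
--
-- def solution(n, weak, dist):
--     L = len(weak)
--     weak2 = weak + [w + n for w in weak]
--     best = None
--     for i in range(L):
--         for perm in permutations(dist):
--             k = covers(weak2, i, L, perm)
--             if k is not None and (best is None or k < best):
--                 best = k
--     return best if best is not None else -1
-- ===== Notes on version B (the rewrite author's own statement) =====
-- stated objective: simpler
-- what changed: B replaces A's modular walk with a visited-set of weak values and a per-call wrap counter by a single threshold sweep over the doubled array weak + [w+n for w in weak], consuming friends of the permutation on demand at the first uncovered position.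
-- outside the precondition, e.g. on solution(10, [1, 1], [10]): A returns -1, B returns 1
import Mathlib
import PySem

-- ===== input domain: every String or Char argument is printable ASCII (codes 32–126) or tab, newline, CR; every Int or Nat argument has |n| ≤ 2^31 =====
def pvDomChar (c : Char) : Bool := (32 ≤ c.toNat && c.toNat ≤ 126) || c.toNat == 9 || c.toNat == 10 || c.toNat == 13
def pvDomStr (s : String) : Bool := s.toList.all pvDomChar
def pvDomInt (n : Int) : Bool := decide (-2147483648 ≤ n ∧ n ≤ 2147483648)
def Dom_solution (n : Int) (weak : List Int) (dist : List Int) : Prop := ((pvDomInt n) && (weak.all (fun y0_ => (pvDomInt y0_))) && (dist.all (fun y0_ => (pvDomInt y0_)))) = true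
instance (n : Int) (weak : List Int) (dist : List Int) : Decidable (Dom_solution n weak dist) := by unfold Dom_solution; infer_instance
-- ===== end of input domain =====

-- B replaces A's modular walk with visited-set bookkeeping by a single threshold sweep
-- over the doubled array weak ++ (weak + n), counting friends consumed on demand (objective: simpler).

-- ===== PORT A =====
-- the 'while' of addVisited, ported with fuel weak.length + 1 (sufficient under Pre_solution, proved in pv_addLoop_spec)
def addVisitedLoop (n : Int) (weak : List Int) (start num : Int) :
    Nat → Int → Int → PySem.Set Int → Int × PySem.Set Int
  | 0, nxt, _, visited => (nxt, visited)
  | fuel + 1, nxt, loop, visited =>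
    if visited.length < weak.length then
      let nxt1 := if nxt ≥ (weak.length : Int) then nxt - (weak.length : Int) else nxt
      let loop1 := if nxt ≥ (weak.length : Int) then loop + 1 else loop
      match PySem.List.pyGet? weak nxt1, PySem.List.pyGet? weak start with
      | some wn, some ws =>
        if wn > ws + num - loop1 * n then (nxt1, visited)
        else addVisitedLoop n weak start num fuel (nxt1 + 1) loop1 (PySem.Set.add visited wn)
      | _, _ => (nxt1, visited)  -- IndexError: unreachable under Pre_solution
    else (nxt, visited)

def addVisited (n : Int) (weak : List Int) (start num : Int) (visited : PySem.Set Int) :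
    Int × PySem.Set Int :=
  addVisitedLoop n weak start num (weak.length + 1) start 0 visited

-- the 'for d in dists' loop (with its two breaks) of solution
def innerA (n : Int) (weak : List Int) : List Int → Int → PySem.Set Int → Int → Int → Int
  | [], _, _, _, answer => answer
  | d :: rest, ptr, visited, cand, answer =>
    let s := addVisited n weak ptr d visited
    let cand' := cand + 1
    if cand' > answer ∧ answer ≠ -1 then answer
    else if s.2.length = weak.length then (if answer ≠ -1 then min answer cand' else cand')
    else innerA n weak rest s.1 s.2 cand' answer

def solution (n : Int) (weak : List Int) (dist : List Int) : Int :=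
  (PySem.List.pyRange 0 weak.length 1).foldl (fun answer idx =>
    (PySem.List.permutations dist dist.length).foldl (fun answer dists =>
      innerA n weak dists idx PySem.Set.empty 0 answer) answer) (-1)

-- ===== PORT B =====
-- the inner 'while weak2[j] > reach' of covers ('used' is a non-negative python int, carried as Nat for indexing)
def consumeW (wj : Int) : Int → List Int → Nat → Option (Int × Nat)
  | reach, perm, used =>
    if wj > reach then
      match h : perm[used]? with
      | some d => consumeW wj (wj + d) perm (used + 1)
      | none => none
    else some (reach, used)
termination_by reach perm used => perm.length - used
decreasing_by
  obtain ⟨hlt, -⟩ := List.getElem?_eq_some_iff.mp h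
  omega

-- the 'for j in range(i, i+L)' loop of covers
def coversGo (weak2 : List Int) (perm : List Int) : List Int → Int → Nat → Option Nat
  | [], _, used => some used
  | j :: js, reach, used =>
    match PySem.List.pyGet? weak2 j with
    | some wj =>
      match consumeW wj reach perm used with
      | some ru => coversGo weak2 perm js ru.1 ru.2
      | none => none
    | none => none  -- IndexError: unreachable (j is drawn from range(i, i+L))

def coversB (weak2 : List Int) (i L : Int) (perm : List Int) : Option Nat :=
  match PySem.List.pyGet? weak2 i with
  | some wi => coversGo weak2 perm (PySem.List.pyRange i (i + L) 1) (wi - 1) 0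
  | none => none  -- IndexError: unreachable (i ∈ range(L) and weak2 has length 2*L)

def solution_alt (n : Int) (weak : List Int) (dist : List Int) : Int :=
  let weak2 := weak ++ weak.map (· + n)
  let best := (PySem.List.pyRange 0 weak.length 1).foldl (fun best i =>
    (PySem.List.permutations dist dist.length).foldl (fun best perm =>
      match coversB weak2 i weak.length perm with
      | some k =>
        match best with
        | none => some (k : Int)
        | some b => if (k : Int) < b then some (k : Int) else some b
      | none => best) best) none
  match best with
  | some b => b
  | none => -1

-- ===== PRECONDITION & SPEC =====
-- Pre_ excludes weak lists with duplicate entries (a circular wall's weak points are distinct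
-- positions): A tracks coverage as a set of weak VALUES, so with duplicates the set can never
-- reach len(weak) and A answers -1 regardless of actual coverage (and for n ≤ 0 its while loop
-- need not terminate at all), while B covers such lists normally.
def Pre_solution (n : Int) (weak : List Int) (dist : List Int) : Prop := weak.Nodup
instance (n : Int) (weak : List Int) (dist : List Int) : Decidable (Pre_solution n weak dist) := by
  unfold Pre_solution; infer_instance

def pvWitness_solution : Int × List Int × List Int := (7, [1, 3, 5], [2])

def Spec_solution (n : Int) (weak : List Int) (dist : List Int) (out : Int) : Prop := out = solution_alt n weak dist
instance (n : Int) (weak : List Int) (dist : List Int) (out : Int) : Decidable (Spec_solution n weak dist out) := by unfold Spec_solution; infer_instance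

-- ===== CLAIM (what is proved, stated in full; the proofs are below) =====
def Claim_equal_solution : Prop := ∀ (n : Int) (weak : List Int) (dist : List Int), Dom_solution n weak dist → Pre_solution n weak dist → Spec_solution n weak dist (solution n weak dist)

-- ===== LEMMAS AND PROOFS =====

-- unrolled coordinate: position j (0 ≤ j < 2*len) on the doubled circle
def pvW (n : Int) (weak : List Int) (j : Nat) : Int :=
  weak.getD (j % weak.length) 0 + ((j / weak.length : Nat) : Int) * n

-- first position ≥ j that is not covered by threshold r (capped at stop)
def pvAdv (n : Int) (weak : List Int) (stop : Nat) (r : Int) (j : Nat) : Nat :=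
  if j < stop ∧ pvW n weak j ≤ r then pvAdv n weak stop r (j + 1) else j
termination_by stop - j
decreasing_by omega

-- A's visited set after covering positions i, …, j-1
def pvVisited (weak : List Int) (i j : Nat) : PySem.Set Int :=
  (List.range' i (j - i)).foldl (fun s x => PySem.Set.add s (weak.getD (x % weak.length) 0)) PySem.Set.empty

-- friend-by-friend greedy (A's shape): consume d, jump with pvAdv
def pvGreedy (n : Int) (weak : List Int) (stop : Nat) : List Int → Nat → Nat → Option Nat
  | [], j, u => if j = stop then some u else none
  | d :: rest, j, u =>
    if j = stop then some u
    else pvGreedy n weak stop rest (pvAdv n weak stop (pvW n weak j + d) j) (u + 1)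

-- position-by-position machine (B's shape)
def pvMach (n : Int) (weak : List Int) (stop : Nat) (perm : List Int) : Nat → Nat → Int → Option Nat
  | j, u, r =>
    if j < stop then
      if pvW n weak j ≤ r then pvMach n weak stop perm (j + 1) u r
      else
        match h : perm[u]? with
        | some d => pvMach n weak stop perm j (u + 1) (pvW n weak j + d)
        | none => none
    else some u
termination_by j u r => (stop - j, perm.length - u)
decreasing_by
  · left; omega
  · obtain ⟨hlt, -⟩ := List.getElem?_eq_some_iff.mp h
    right <;> omega

def pvOpt : Option Int → Int
  | none => -1
  | some b => b

lemma consumeW_eq (wj r : Int) (perm : List Int) (u : Nat) :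
    consumeW wj r perm u =
      if wj > r then
        match perm[u]? with
        | some d => consumeW wj (wj + d) perm (u + 1)
        | none => none
      else some (r, u) := by
  rw [consumeW]
  by_cases h : wj > r
  · simp only [if_pos h]
    split <;> split <;> simp_all
  · simp only [if_neg h]

lemma pvMach_eq (n : Int) (weak : List Int) (stop : Nat) (perm : List Int)
    (j u : Nat) (r : Int) :
    pvMach n weak stop perm j u r =
      if j < stop then
        if pvW n weak j ≤ r then pvMach n weak stop perm (j + 1) u r
        else
          match perm[u]? with
          | some d => pvMach n weak stop perm j (u + 1) (pvW n weak j + d)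
          | none => none
      else some u := by
  rw [pvMach]
  by_cases h1 : j < stop
  · simp only [if_pos h1]
    by_cases h2 : pvW n weak j ≤ r
    · simp only [if_pos h2]
    · simp only [if_neg h2]
      split <;> split <;> simp_all
  · simp only [if_neg h1]

lemma pvVisited_self (weak : List Int) (i : Nat) : pvVisited weak i i = PySem.Set.empty := by
  simp [pvVisited]

lemma pvVisited_succ (weak : List Int) {i j : Nat} (h : i ≤ j) :
    pvVisited weak i (j + 1) =
      PySem.Set.add (pvVisited weak i j) (weak.getD (j % weak.length) 0) := by
  unfold pvVisited
  rw [show j + 1 - i = (j - i) + 1 by omega, List.range'_concat, List.foldl_append,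
    show i + 1 * (j - i) = j by omega]
  rfl

lemma mem_pvVisited {weak : List Int} {i j : Nat} {x : Int} :
    x ∈ pvVisited weak i j ↔ ∃ t, i ≤ t ∧ t < j ∧ x = weak.getD (t % weak.length) 0 := by
  induction j with
  | zero =>
    constructor
    · intro hx; simp [pvVisited, PySem.Set.empty] at hx
    · rintro ⟨t, -, ht, -⟩; omega
  | succ j ih =>
    by_cases h : i ≤ j
    · rw [pvVisited_succ _ h, PySem.Set.mem_add, ih]
      constructor
      · rintro (⟨t, ht1, ht2, ht3⟩ | rfl)
        · exact ⟨t, ht1, by omega, ht3⟩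
        · exact ⟨j, h, by omega, rfl⟩
      · rintro ⟨t, ht1, ht2, ht3⟩
        by_cases htj : t = j
        · subst htj; exact Or.inr ht3
        · exact Or.inl ⟨t, ht1, by omega, ht3⟩
    · constructor
      · intro hx
        have hz : j + 1 - i = 0 := by omega
        simp [pvVisited, hz, PySem.Set.empty] at hx
      · rintro ⟨t, ht1, ht2, -⟩; omega

lemma length_pvVisited {weak : List Int} (hnd : weak.Nodup) {i j : Nat}
    (hij : i ≤ j) (hle : j ≤ i + weak.length) :
    (pvVisited weak i j).length = j - i := by
  induction j, hij using Nat.le_induction with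
  | base => simp [pvVisited_self, PySem.Set.empty]
  | succ j hij ih =>
    have hL : 0 < weak.length := by omega
    have hnot : weak.getD (j % weak.length) 0 ∉ pvVisited weak i j := by
      rw [mem_pvVisited]
      rintro ⟨t, ht1, ht2, ht3⟩
      have htm : t % weak.length ≠ j % weak.length := by
        intro he
        have hdvd : weak.length ∣ j - t := (Nat.modEq_iff_dvd' (by omega)).mp he
        have := Nat.le_of_dvd (by omega) hdvd
        omega
      have h1 : t % weak.length < weak.length := Nat.mod_lt _ hL
      have h2 : j % weak.length < weak.length := Nat.mod_lt _ hL
      rw [List.getD_eq_getElem _ _ h2, List.getD_eq_getElem _ _ h1] at ht3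
      exact htm ((hnd.getElem_inj_iff).mp ht3.symm)
    rw [pvVisited_succ _ hij, PySem.Set.add_of_not_mem hnot, List.length_append,
      ih (by omega)]
    simp; omega

lemma le_pvAdv (n : Int) (weak : List Int) (stop : Nat) (r : Int) (j : Nat) :
    j ≤ pvAdv n weak stop r j := by
  fun_induction pvAdv with
  | case1 j hc ih => omega
  | case2 j hc => omega

lemma pvAdv_le_stop (n : Int) (weak : List Int) (stop : Nat) (r : Int) {j : Nat} (h : j ≤ stop) :
    pvAdv n weak stop r j ≤ stop := by
  fun_induction pvAdv with
  | case1 j hc ih => exact ih (by omega)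
  | case2 j hc => exact h

lemma pvAdv_stop_cond (n : Int) (weak : List Int) (stop : Nat) (r : Int) (j : Nat)
    (h : pvAdv n weak stop r j < stop) : r < pvW n weak (pvAdv n weak stop r j) := by
  fun_induction pvAdv with
  | case1 j hc ih => exact ih h
  | case2 j hc =>
    rw [not_and_or, not_le] at hc
    rcases hc with hc | hc
    · exact absurd h hc
    · exact hc

lemma pvAdv_eq_of_not (n : Int) (weak : List Int) (stop : Nat) (r : Int) (j : Nat)
    (h : ¬(j < stop ∧ pvW n weak j ≤ r)) : pvAdv n weak stop r j = j := by
  rw [pvAdv]; simp [h]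

lemma pvAdv_succ (n : Int) (weak : List Int) (stop : Nat) (r : Int) (j : Nat)
    (h1 : j < stop) (h2 : pvW n weak j ≤ r) :
    pvAdv n weak stop r j = pvAdv n weak stop r (j + 1) := by
  rw [pvAdv]; simp [h1, h2]

lemma pvMach_skip (n : Int) (weak : List Int) (stop : Nat) (perm : List Int)
    (u : Nat) (r : Int) : ∀ (m j : Nat), stop - j ≤ m →
    pvMach n weak stop perm j u r = pvMach n weak stop perm (pvAdv n weak stop r j) u r := by
  intro m
  induction m with
  | zero =>
    intro j hj
    rw [pvAdv_eq_of_not]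
    intro hc
    omega
  | succ m ih =>
    intro j hj
    by_cases hc : j < stop ∧ pvW n weak j ≤ r
    · rw [pvAdv_succ _ _ _ _ _ hc.1 hc.2, ← ih (j + 1) (by omega)]
      conv_lhs => rw [pvMach_eq]
      simp only [if_pos hc.1, if_pos hc.2]
    · rw [pvAdv_eq_of_not _ _ _ _ _ hc]

lemma consumeW_mach (n : Int) (weak : List Int) (stop : Nat) (perm : List Int) :
    ∀ (m u : Nat) (j : Nat) (r : Int), perm.length - u ≤ m → j < stop →
    pvMach n weak stop perm j u r =
      (match consumeW (pvW n weak j) r perm u with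
       | some ru => pvMach n weak stop perm (j + 1) ru.2 ru.1
       | none => none) := by
  intro m
  induction m with
  | zero =>
    intro u j r hm hj
    by_cases hle : pvW n weak j ≤ r
    · rw [consumeW_eq]
      simp only [if_neg (not_lt.mpr hle)]
      conv_lhs => rw [pvMach_eq]
      simp [hj, hle]
    · have hu : perm[u]? = none := List.getElem?_eq_none (by omega)
      rw [consumeW_eq]
      simp only [if_pos (lt_of_not_ge hle), hu]
      conv_lhs => rw [pvMach_eq]
      simp [hj, hle, hu]
  | succ m ih =>
    intro u j r hm hj
    by_cases hle : pvW n weak j ≤ r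
    · rw [consumeW_eq]
      simp only [if_neg (not_lt.mpr hle)]
      conv_lhs => rw [pvMach_eq]
      simp [hj, hle]
    · rcases hu : perm[u]? with _ | d
      · rw [consumeW_eq]
        simp only [if_pos (lt_of_not_ge hle), hu]
        conv_lhs => rw [pvMach_eq]
        simp [hj, hle, hu]
      · have hlt : u < perm.length := (List.getElem?_eq_some_iff.mp hu).1
        rw [consumeW_eq]
        simp only [if_pos (lt_of_not_ge hle), hu]
        conv_lhs => rw [pvMach_eq]
        simp only [if_pos hj, if_neg hle, hu]
        exact ih (u + 1) j (pvW n weak j + d) (by omega) hj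

lemma pvW2_get (n : Int) (weak : List Int) {j : Nat} (h : j < 2 * weak.length) :
    PySem.List.pyGet? (weak ++ weak.map (· + n)) (j : Int) = some (pvW n weak j) := by
  have hlen : (weak ++ weak.map (· + n)).length = 2 * weak.length := by
    simp; omega
  rw [PySem.List.pyGet?_natCast, List.getElem?_eq_getElem (by omega)]
  congr 1
  by_cases hj : j < weak.length
  · rw [List.getElem_append_left hj]
    unfold pvW
    rw [Nat.mod_eq_of_lt hj, Nat.div_eq_of_lt hj, List.getD_eq_getElem _ _ hj]
    simp
  · have hL : 0 < weak.length := by omega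
    have hjL : j - weak.length < weak.length := by omega
    rw [List.getElem_append_right (le_of_not_gt hj)]
    have hsplit : j = (j - weak.length) + 1 * weak.length := by omega
    have hmod : j % weak.length = j - weak.length := by
      conv_lhs => rw [hsplit]
      rw [Nat.add_mul_mod_self_right, Nat.mod_eq_of_lt hjL]
    have hdiv : j / weak.length = 1 := by
      conv_lhs => rw [hsplit]
      rw [Nat.add_mul_div_right _ _ hL, Nat.div_eq_of_lt hjL]
    unfold pvW
    rw [hmod, hdiv, List.getD_eq_getElem _ _ hjL]
    simp [List.getElem_map]

lemma coversGo_eq_mach (n : Int) (weak : List Int) (perm : List Int) {stop : Nat}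
    (hstop : stop ≤ 2 * weak.length) :
    ∀ (m j : Nat) (r : Int) (u : Nat), j ≤ stop → stop - j ≤ m →
    coversGo (weak ++ weak.map (· + n)) perm (PySem.List.pyRange (j : Int) (stop : Int) 1) r u =
      pvMach n weak stop perm j u r := by
  intro m
  induction m with
  | zero =>
    intro j r u hj hm
    have hjs : j = stop := by omega
    subst hjs
    rw [PySem.List.pyRange_one_eq_nil le_rfl, pvMach_eq]
    simp [coversGo]
  | succ m ih =>
    intro j r u hj hm
    by_cases hlt : j < stop
    · rw [PySem.List.pyRange_one_cons (by exact_mod_cast hlt)]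
      rw [consumeW_mach n weak stop perm perm.length u j r (by omega) hlt]
      simp only [coversGo]
      rw [pvW2_get n weak (by omega)]
      rcases hcw : consumeW (pvW n weak j) r perm u with _ | ru
      · simp only [hcw]
      · simp only [hcw]
        have hc : ((j : Int) + 1) = (((j + 1 : Nat)) : Int) := by push_cast; ring
        rw [hc]
        exact ih (j + 1) ru.1 ru.2 (by omega) (by omega)
    · have hjs : j = stop := by omega
      subst hjs
      rw [PySem.List.pyRange_one_eq_nil le_rfl, pvMach_eq]
      simp [coversGo]

lemma greedy_eq_mach (n : Int) (weak : List Int) (stop : Nat) (perm : List Int) :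
    ∀ (rest : List Int) (j u : Nat) (r : Int), j ≤ stop → rest = perm.drop u →
    (j = stop ∨ r < pvW n weak j) →
    pvGreedy n weak stop rest j u = pvMach n weak stop perm j u r := by
  intro rest
  induction rest with
  | nil =>
    intro j u r hj hd hs
    have hul : perm.length ≤ u := List.drop_eq_nil_iff.mp hd.symm
    by_cases hjs : j = stop
    · subst hjs
      rw [pvGreedy, pvMach_eq]
      simp
    · have hlt : j < stop := by omega
      have hrW : r < pvW n weak j := hs.resolve_left hjs
      rw [pvGreedy, pvMach_eq]
      simp [hjs, hlt, not_le.mpr hrW, List.getElem?_eq_none hul]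
  | cons d rest ih =>
    intro j u r hj hd hs
    by_cases hjs : j = stop
    · subst hjs
      rw [pvGreedy, pvMach_eq]
      simp
    · have hlt : j < stop := by omega
      have hrW : r < pvW n weak j := hs.resolve_left hjs
      have hu : perm[u]? = some d := by
        have h0 : (perm.drop u)[0]? = some d := by rw [← hd]; rfl
        rw [List.getElem?_drop] at h0
        simpa using h0
      rw [pvGreedy]
      conv_rhs => rw [pvMach_eq]
      simp only [if_pos hlt, if_neg hjs, if_neg (not_le.mpr hrW), hu]
      rw [pvMach_skip n weak stop perm (u + 1) (pvW n weak j + d) (stop - j) j le_rfl]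
      apply ih
      · exact pvAdv_le_stop _ _ _ _ hj
      · have hdr : perm.drop (u + 1) = (perm.drop u).drop 1 := by
          rw [List.drop_drop]
        rw [hdr, ← hd]
        rfl
      · by_cases hstop2 : pvAdv n weak stop (pvW n weak j + d) j = stop
        · exact Or.inl hstop2
        · exact Or.inr (pvAdv_stop_cond _ _ _ _ _
            (lt_of_le_of_ne (pvAdv_le_stop _ _ _ _ hj) hstop2))

lemma pvGreedy_mono (n : Int) (weak : List Int) (stop : Nat) :
    ∀ (rest : List Int) (j u k : Nat), pvGreedy n weak stop rest j u = some k → u ≤ k := by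
  intro rest
  induction rest with
  | nil =>
    intro j u k h
    rw [pvGreedy] at h
    split at h
    · simp at h; omega
    · simp at h
  | cons d rest ih =>
    intro j u k h
    rw [pvGreedy] at h
    split at h
    · simp at h; omega
    · have := ih _ _ _ h
      omega

lemma addVisitedLoop_eq (n : Int) (weak : List Int) (start num : Int) (fuel : Nat)
    (nxt loop : Int) (visited : PySem.Set Int) :
    addVisitedLoop n weak start num (fuel + 1) nxt loop visited =
      if visited.length < weak.length then
        let nxt1 := if nxt ≥ (weak.length : Int) then nxt - (weak.length : Int) else nxt
        let loop1 := if nxt ≥ (weak.length : Int) then loop + 1 else loop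
        match PySem.List.pyGet? weak nxt1, PySem.List.pyGet? weak start with
        | some wn, some ws =>
          if wn > ws + num - loop1 * n then (nxt1, visited)
          else addVisitedLoop n weak start num fuel (nxt1 + 1) loop1 (PySem.Set.add visited wn)
        | _, _ => (nxt1, visited)
      else (nxt, visited) := by
  rw [addVisitedLoop]

lemma pvGreedy_at_stop (n : Int) (weak : List Int) (stop : Nat) :
    ∀ (rest : List Int) (u : Nat), pvGreedy n weak stop rest stop u = some u := by
  intro rest
  cases rest <;> intro u <;> rw [pvGreedy] <;> simp

lemma pv_addLoop_spec {n d : Int} {weak : List Int} (hnd : weak.Nodup) {i p : Nat}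
    (hiL : i < weak.length) (hip : i ≤ p) (hp : p < i + weak.length) :
    ∀ (fuel j a q : Nat), p ≤ j → j ≤ i + weak.length → i + weak.length - j < fuel →
    a + q * weak.length = j → a ≤ weak.length → p / weak.length ≤ q →
    (addVisitedLoop n weak ((p % weak.length : Nat) : Int) d fuel ((a : Nat) : Int)
        (((q : Nat) : Int) - ((p / weak.length : Nat) : Int)) (pvVisited weak i j)).2 =
      pvVisited weak i (pvAdv n weak (i + weak.length) (pvW n weak p + d) j) ∧
    (pvAdv n weak (i + weak.length) (pvW n weak p + d) j < i + weak.length →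
      (addVisitedLoop n weak ((p % weak.length : Nat) : Int) d fuel ((a : Nat) : Int)
        (((q : Nat) : Int) - ((p / weak.length : Nat) : Int)) (pvVisited weak i j)).1 =
      ((pvAdv n weak (i + weak.length) (pvW n weak p + d) j % weak.length : Nat) : Int)) := by
  intro fuel
  induction fuel with
  | zero =>
    intro j a q h1 h2 h3 h4 h5 h6
    exact absurd h3 (by omega)
  | succ fuel ih =>
    intro j a q h1 h2 h3 h4 h5 h6
    have hL : 0 < weak.length := by omega
    by_cases hjs : j = i + weak.length
    · subst hjs
      have hlen : (pvVisited weak i (i + weak.length)).length = weak.length := by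
        rw [length_pvVisited hnd (by omega) le_rfl]; omega
      have hadv : pvAdv n weak (i + weak.length) (pvW n weak p + d) (i + weak.length)
          = i + weak.length :=
        pvAdv_eq_of_not _ _ _ _ _ (fun hc => absurd hc.1 (lt_irrefl _))
      constructor
      · rw [addVisitedLoop_eq, if_neg (by simp [hlen]), hadv]
      · rw [hadv]
        intro hc
        exact absurd hc (lt_irrefl _)
    · have hjlt : j < i + weak.length := by omega
      have hcond : (pvVisited weak i j).length < weak.length := by
        rw [length_pvVisited hnd (by omega) (by omega)]; omega
      obtain ⟨a', q', ha'L, ha'j, hq'p, hifn, hifl⟩ :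
          ∃ a' q' : Nat, a' < weak.length ∧ a' + q' * weak.length = j ∧ p / weak.length ≤ q' ∧
            ((if ((a : Nat) : Int) ≥ (weak.length : Int)
                then ((a : Nat) : Int) - (weak.length : Int) else ((a : Nat) : Int))
              = ((a' : Nat) : Int)) ∧
            ((if ((a : Nat) : Int) ≥ (weak.length : Int)
                then ((q : Nat) : Int) - ((p / weak.length : Nat) : Int) + 1
                else ((q : Nat) : Int) - ((p / weak.length : Nat) : Int))
              = ((q' : Nat) : Int) - ((p / weak.length : Nat) : Int)) := by
        by_cases haL : weak.length ≤ a
        · have haL' : a = weak.length := by omega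
          have hge : ((a : Nat) : Int) ≥ (weak.length : Int) := by exact_mod_cast haL
          refine ⟨0, q + 1, hL, ?_, by omega, ?_, ?_⟩
          · calc 0 + (q + 1) * weak.length = a + q * weak.length := by rw [haL']; ring
              _ = j := h4
          · rw [if_pos hge, haL']
            push_cast
            ring
          · rw [if_pos hge]
            push_cast
            ring
        · have hlt2 : ¬ (((a : Nat) : Int) ≥ (weak.length : Int)) := by exact_mod_cast haL
          exact ⟨a, q, by omega, h4, h6, by rw [if_neg hlt2], by rw [if_neg hlt2]⟩
      have hmod : j % weak.length = a' := by
        rw [← ha'j, Nat.add_mul_mod_self_right, Nat.mod_eq_of_lt ha'L]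
      have hdiv : j / weak.length = q' := by
        rw [← ha'j, Nat.add_mul_div_right _ _ hL, Nat.div_eq_of_lt ha'L, Nat.zero_add]
      have hget1 : PySem.List.pyGet? weak ((a' : Nat) : Int) = some (weak.getD a' 0) := by
        rw [PySem.List.pyGet?_natCast, List.getElem?_eq_getElem ha'L,
          List.getD_eq_getElem _ _ ha'L]
      have hpmod : p % weak.length < weak.length := Nat.mod_lt _ hL
      have hget2 : PySem.List.pyGet? weak ((p % weak.length : Nat) : Int)
          = some (weak.getD (p % weak.length) 0) := by
        rw [PySem.List.pyGet?_natCast, List.getElem?_eq_getElem hpmod,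
          List.getD_eq_getElem _ _ hpmod]
      have hWj : pvW n weak j = weak.getD a' 0 + ((q' : Nat) : Int) * n := by
        unfold pvW
        rw [hmod, hdiv]
      have hWp : pvW n weak p
          = weak.getD (p % weak.length) 0 + ((p / weak.length : Nat) : Int) * n := rfl
      have hciff : (weak.getD a' 0 > weak.getD (p % weak.length) 0 + d
            - (((q' : Nat) : Int) - ((p / weak.length : Nat) : Int)) * n)
          ↔ (pvW n weak p + d < pvW n weak j) := by
        rw [hWj, hWp, sub_mul]
        constructor <;> intro h <;> linarith
      rw [addVisitedLoop_eq, if_pos hcond]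
      simp only [hifn, hifl, hget1, hget2]
      by_cases hbrk : pvW n weak p + d < pvW n weak j
      · rw [if_pos (hciff.mpr hbrk)]
        have hadv : pvAdv n weak (i + weak.length) (pvW n weak p + d) j = j :=
          pvAdv_eq_of_not _ _ _ _ _ (fun hc => absurd hc.2 (not_le.mpr hbrk))
        rw [hadv]
        exact ⟨rfl, fun _ => by rw [hmod]⟩
      · rw [if_neg (fun hc => hbrk (hciff.mp hc))]
        have hadv : pvAdv n weak (i + weak.length) (pvW n weak p + d) j =
            pvAdv n weak (i + weak.length) (pvW n weak p + d) (j + 1) :=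
          pvAdv_succ _ _ _ _ _ hjlt (not_lt.mp hbrk)
        have hvis : PySem.Set.add (pvVisited weak i j) (weak.getD a' 0)
            = pvVisited weak i (j + 1) := by
          rw [pvVisited_succ _ (by omega : i ≤ j), hmod]
        have hcast : ((a' : Nat) : Int) + 1 = (((a' + 1 : Nat)) : Int) := by push_cast; ring
        rw [hadv, hvis, hcast]
        exact ih (j + 1) (a' + 1) q' (by omega) (by omega) (by omega)
          (by rw [Nat.add_right_comm, ha'j]) (by omega) hq'p

lemma pv_addVisited_spec {n d : Int} {weak : List Int} (hnd : weak.Nodup) {i p : Nat}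
    (hiL : i < weak.length) (hip : i ≤ p) (hp : p < i + weak.length) :
    (addVisited n weak ((p % weak.length : Nat) : Int) d (pvVisited weak i p)).2 =
      pvVisited weak i (pvAdv n weak (i + weak.length) (pvW n weak p + d) p) ∧
    (pvAdv n weak (i + weak.length) (pvW n weak p + d) p < i + weak.length →
      (addVisited n weak ((p % weak.length : Nat) : Int) d (pvVisited weak i p)).1 =
      ((pvAdv n weak (i + weak.length) (pvW n weak p + d) p % weak.length : Nat) : Int)) := by
  have H := pv_addLoop_spec (n := n) (d := d) hnd hiL hip hp (weak.length + 1) p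
    (p % weak.length) (p / weak.length) le_rfl (by omega) (by omega)
    (Nat.mod_add_div' p weak.length) (le_of_lt (Nat.mod_lt _ (by omega))) le_rfl
  rw [sub_self] at H
  unfold addVisited
  exact H

lemma innerA_spec {n : Int} {weak : List Int} (hnd : weak.Nodup) {i : Nat}
    (hiL : i < weak.length) :
    ∀ (dists : List Int) (j u : Nat) (answer : Int), i ≤ j → j < i + weak.length →
    innerA n weak dists ((j % weak.length : Nat) : Int) (pvVisited weak i j) ((u : Nat) : Int) answer =
      (match pvGreedy n weak (i + weak.length) dists j u with
       | some k => if answer = -1 then (k : Int) else min answer (k : Int)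
       | none => answer) := by
  intro dists
  induction dists with
  | nil =>
    intro j u answer hij hjlt
    rw [innerA, pvGreedy]
    simp [Nat.ne_of_lt hjlt]
  | cons d rest ih =>
    intro j u answer hij hjlt
    have hL : 0 < weak.length := by omega
    obtain ⟨hv2, hv1⟩ := pv_addVisited_spec (n := n) (d := d) hnd hiL (p := j) hij hjlt
    rw [innerA]
    conv_rhs => rw [pvGreedy]
    rw [if_neg (Nat.ne_of_lt hjlt)]
    simp only [hv2]
    have hj1le : pvAdv n weak (i + weak.length) (pvW n weak j + d) j ≤ i + weak.length :=
      pvAdv_le_stop _ _ _ _ (by omega)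
    have hj1ge : j ≤ pvAdv n weak (i + weak.length) (pvW n weak j + d) j :=
      le_pvAdv _ _ _ _ _
    have hlen : (pvVisited weak i (pvAdv n weak (i + weak.length) (pvW n weak j + d) j)).length
        = pvAdv n weak (i + weak.length) (pvW n weak j + d) j - i :=
      length_pvVisited hnd (by omega) hj1le
    by_cases hpr : ((u : Int) + 1 > answer ∧ answer ≠ -1)
    · rw [if_pos hpr]
      rcases hg : pvGreedy n weak (i + weak.length) rest
          (pvAdv n weak (i + weak.length) (pvW n weak j + d) j) (u + 1) with _ | k
      · rfl
      · dsimp only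
        have hk := pvGreedy_mono n weak (i + weak.length) _ _ _ _ hg
        rw [if_neg hpr.2]
        refine (min_eq_left ?_).symm
        have : (u : Int) + 1 ≤ (k : Int) := by exact_mod_cast hk
        omega
    · rw [if_neg hpr]
      by_cases hfull : pvAdv n weak (i + weak.length) (pvW n weak j + d) j = i + weak.length
      · have hfl : (pvVisited weak i
            (pvAdv n weak (i + weak.length) (pvW n weak j + d) j)).length = weak.length := by
          rw [hlen, hfull]; omega
        rw [if_pos hfl, hfull, pvGreedy_at_stop]
        simp only []
        by_cases ha : answer = -1 <;> simp [ha]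
      · have hj1lt : pvAdv n weak (i + weak.length) (pvW n weak j + d) j < i + weak.length := by
          omega
        have hne : (pvVisited weak i
            (pvAdv n weak (i + weak.length) (pvW n weak j + d) j)).length ≠ weak.length := by
          rw [hlen]; omega
        rw [if_neg hne, hv1 hj1lt,
          show ((u : Int) + 1) = (((u + 1 : Nat)) : Int) by push_cast; ring]
        exact ih _ (u + 1) answer (by omega) hj1lt

-- one (start, permutation) step: what B's covers computes, phrased through pvGreedy
lemma coversB_eq_greedy {n : Int} {weak : List Int} {i : Nat} (hiL : i < weak.length)
    (perm : List Int) :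
    coversB (weak ++ weak.map (· + n)) (i : Int) (weak.length : Int) perm =
      pvGreedy n weak (i + weak.length) perm i 0 := by
  unfold coversB
  simp only [pvW2_get n weak (show i < 2 * weak.length by omega)]
  rw [show ((i : Int) + (weak.length : Int)) = (((i + weak.length : Nat)) : Int) by push_cast; ring]
  rw [coversGo_eq_mach n weak perm (by omega) (i + weak.length) i (pvW n weak i - 1) 0
    (by omega) (by omega)]
  rw [← greedy_eq_mach n weak (i + weak.length) perm perm i 0 (pvW n weak i - 1)
    (by omega) (by simp) (Or.inr (by omega))]

def pvRel (answer : Int) (best : Option Int) : Prop :=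
  answer = pvOpt best ∧ ∀ b, best = some b → 1 ≤ b

def pvBstep (res : Option Nat) (best : Option Int) : Option Int :=
  match res with
  | some k =>
    match best with
    | none => some (k : Int)
    | some b => if (k : Int) < b then some (k : Int) else some b
  | none => best

lemma pv_step_rel {n : Int} {weak : List Int} (hnd : weak.Nodup) {i : Nat}
    (hiL : i < weak.length) (perm : List Int) {answer : Int} {best : Option Int}
    (h : pvRel answer best) :
    pvRel (innerA n weak perm ((i : Nat) : Int) PySem.Set.empty 0 answer)
      (pvBstep (coversB (weak ++ weak.map (· + n)) (i : Int) (weak.length : Int) perm) best) := by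
  obtain ⟨hA, hB⟩ := h
  have HA := innerA_spec (n := n) hnd hiL perm i 0 answer le_rfl (by omega)
  rw [Nat.mod_eq_of_lt hiL, pvVisited_self,
    show (((0 : Nat)) : Int) = (0 : Int) from rfl] at HA
  rw [coversB_eq_greedy hiL perm, HA]
  rcases hg : pvGreedy n weak (i + weak.length) perm i 0 with _ | k
  · exact ⟨hA, hB⟩
  · have hk1 : 1 ≤ k := by
      cases perm with
      | nil =>
        rw [pvGreedy, if_neg (Nat.ne_of_lt (show i < i + weak.length by omega))] at hg
        cases hg
      | cons d rest =>
        rw [pvGreedy, if_neg (Nat.ne_of_lt (show i < i + weak.length by omega))] at hg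
        exact pvGreedy_mono n weak (i + weak.length) _ _ _ _ hg
    rcases best with _ | b
    · have hans : answer = -1 := hA
      subst hans
      refine ⟨by simp [pvBstep, pvOpt], ?_⟩
      intro c hc
      simp only [pvBstep] at hc
      injection hc with hc
      rw [← hc]
      exact_mod_cast hk1
    · have hb1 : 1 ≤ b := hB b rfl
      have hans : answer = b := hA
      have hne : ¬ (b = -1) := by omega
      dsimp only [pvBstep]
      rw [hans, if_neg hne]
      by_cases hkb : (k : Int) < b
      · rw [if_pos hkb]
        refine ⟨?_, ?_⟩
        · rw [min_eq_right (le_of_lt hkb)]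
          rfl
        · intro c hc
          injection hc with hc
          rw [← hc]
          exact_mod_cast hk1
      · rw [if_neg hkb]
        refine ⟨?_, ?_⟩
        · rw [min_eq_left (not_lt.mp hkb)]
          rfl
        · intro c hc
          injection hc with hc
          omega

-- ===== VERDICT (by name: the statement is the Claim_ definition above) =====
theorem solution_spec : Claim_equal_solution := by
  intro n weak dist _hdom hpre
  have hnd : weak.Nodup := hpre
  unfold Spec_solution solution solution_alt
  by_cases hL : weak.length = 0
  · rw [hL, show (((0 : Nat)) : Int) = (0 : Int) from rfl,
      PySem.List.pyRange_one_eq_nil le_rfl]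
    simp
  · have hLpos : 0 < weak.length := Nat.pos_of_ne_zero hL
    rw [PySem.List.pyRange_zero_natCast]
    dsimp only
    rw [List.foldl_map, List.foldl_map]
    have main : ∀ (is : List Nat), (∀ i ∈ is, i < weak.length) →
        ∀ (answer : Int) (best : Option Int), pvRel answer best →
        pvRel
          (is.foldl (fun answer i =>
            (PySem.List.permutations dist dist.length).foldl (fun answer dists =>
              innerA n weak dists ((i : Nat) : Int) PySem.Set.empty 0 answer) answer) answer)
          (is.foldl (fun best i =>
            (PySem.List.permutations dist dist.length).foldl (fun best perm =>
              match coversB (weak ++ weak.map (· + n)) ((i : Nat) : Int) (weak.length : Int) perm with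
              | some k =>
                match best with
                | none => some (k : Int)
                | some b => if (k : Int) < b then some (k : Int) else some b
              | none => best) best) best) := by
      intro is
      induction is with
      | nil => exact fun _ answer best h => h
      | cons i is ihs =>
        intro hmem answer best h
        simp only [List.foldl_cons]
        apply ihs (fun x hx => hmem x (List.mem_cons_of_mem _ hx))
        have hiL : i < weak.length := hmem i List.mem_cons_self
        have perms_step : ∀ (ps : List (List Int)) (a : Int) (b : Option Int), pvRel a b →
            pvRel
              (ps.foldl (fun answer dists =>
                innerA n weak dists ((i : Nat) : Int) PySem.Set.empty 0 answer) a)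
              (ps.foldl (fun best perm =>
                match coversB (weak ++ weak.map (· + n)) ((i : Nat) : Int) (weak.length : Int) perm with
                | some k =>
                  match best with
                  | none => some (k : Int)
                  | some b => if (k : Int) < b then some (k : Int) else some b
                | none => best) b) := by
          intro ps
          induction ps with
          | nil => exact fun a b h => h
          | cons p ps ihp =>
            intro a b h
            simp only [List.foldl_cons]
            exact ihp _ _ (pv_step_rel hnd hiL p h)
        exact perms_step _ answer best h
    obtain ⟨h1, -⟩ := main (List.range weak.length) (fun i hi => List.mem_range.mp hi)
      (-1) none ⟨rfl, by simp⟩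
    rw [h1]
    cases ((List.range weak.length).foldl _ none : Option Int) <;> rfl
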